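-- pv_equiv track=rewrite | github.com/avocado-framework/avocado | avocado/utils/network/interfaces.py | validate_ipv4_netmask_format
-- ===== SOURCE A (Python) =====
-- def validate_ipv4_netmask_format(netmask):
--     """
--     This function validates IPv4 Netmask address with following format set.
--
--     1. A string in decimal-dot notation,consisting of four decimal integers
--        starting from 255 and octets separated by dots (e.g 255.255.255.0)
--     2. An integer packed into a bytes object of length 4
--
--     And for Netmask which are not met above conditions,
--     [ eg : 255.0.255.0, 255.255.255, 255.255.255.256, 255.255.255.255.0]
--     returns False.
--
--     :param netmask: netmask address
--     :type pattern: str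
--     :return: True when netmask address pattern/format matches if not
--              return False
--     :rtype: boolean
--     """
--     netmask_list = netmask.split(".")
--     if len(netmask_list) != 4:
--         return False
--     for octet in netmask_list:
--         num = int(octet)
--         if not 0 <= num <= 255:
--             return False
--     octet_bin = [format(int(i), "08b") for i in netmask_list]
--     binary_netmask = ("").join(octet_bin)
--     accept_zero_only = False
--     first_bit = True
--     for symbol in binary_netmask:
--         if accept_zero_only and symbol == "1":
--             return False
--         elif symbol == "0":
--             accept_zero_only = True
--         if first_bit and symbol == "0":
--             return False
--         first_bit = False
--     return True
-- ===== SOURCE B (Python) =====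
-- def validate_ipv4_netmask_format(netmask):
--     parts = netmask.split(".")
--     if len(parts) != 4:
--         return False
--     v = 0
--     for p in parts:
--         num = int(p)
--         if not 0 <= num <= 255:
--             return False
--         v = (v << 8) | num
--     c = 0xFFFFFFFF - v
--     return v != 0 and (c & (c + 1)) == 0
-- ===== Notes on version B (the rewrite author's own statement) =====
-- stated objective: simpler
-- what changed: The four octets are packed into one 32-bit integer v while they are range-checked, and A's character-by-character scan of the 32-char joined binary string (with accept_zero_only/first_bit state) is replaced by the closed-form contiguity test: c = 0xFFFFFFFF - v; valid iff v != 0 and (c & (c + 1)) == 0.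
-- outside the precondition, e.g. on validate_ipv4_netmask_format('300.x.0.0'): A returns False, B returns False; on validate_ipv4_netmask_format('1.x.0.0'): A raises ValueError, B raises ValueError
import Mathlib
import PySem

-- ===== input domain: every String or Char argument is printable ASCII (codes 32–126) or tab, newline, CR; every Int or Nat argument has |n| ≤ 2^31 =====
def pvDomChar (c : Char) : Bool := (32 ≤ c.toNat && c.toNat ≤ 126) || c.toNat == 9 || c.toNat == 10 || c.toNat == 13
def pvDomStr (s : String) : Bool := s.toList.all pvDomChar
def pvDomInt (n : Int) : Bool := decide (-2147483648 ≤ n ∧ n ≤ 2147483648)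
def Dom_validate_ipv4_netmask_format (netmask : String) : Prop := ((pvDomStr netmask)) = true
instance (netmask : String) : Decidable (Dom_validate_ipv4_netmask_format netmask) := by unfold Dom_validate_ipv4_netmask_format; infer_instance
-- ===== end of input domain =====

-- ===== PORT A =====
-- B differs from A only in the back half (closed-form mask test instead of the bit-string scan);
-- the parse/validate front half is the same in both Pythons, as are their ValueErrors (excluded by Pre_).
-- strings are represented as List Char (PySem.Chars) throughout.

-- the loop `for symbol in binary_netmask: ...` with its two early returns and the
-- (accept_zero_only, first_bit) state
def vScan : List Char → Bool → Bool → Bool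
  | [], _, _ => true
  | c :: rest, azo, fb =>
    if azo && c == '1' then false
    else
      let azo' := if c == '0' then true else azo
      if fb && c == '0' then false
      else vScan rest azo' false

-- the loop `for octet in netmask_list: num = int(octet); if not 0 <= num <= 255: return False`
-- (int(octet) is PySem.Int.ofChars?; the none = ValueError case is excluded by Pre_)
def vOctetsOk : List (List Char) → Bool
  | [] => true
  | p :: rest =>
    let num := (PySem.Int.ofChars? p).getD 0
    if ¬(0 ≤ num ∧ num ≤ 255) then false else vOctetsOk rest

def validate_ipv4_netmask_format (netmask : String) : Bool :=
  let netmask_list := PySem.Chars.splitOn netmask.toList ['.']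
  if netmask_list.length ≠ 4 then false
  else if !vOctetsOk netmask_list then false
  else
    -- octet_bin = [format(int(i), "08b") for i in netmask_list]; format(n,'08b') = zfill (toBinChars n) 8
    let octet_bin := netmask_list.map
      (fun p => PySem.Chars.zfill (PySem.Int.toBinChars ((PySem.Int.ofChars? p).getD 0)) 8)
    let binary_netmask := PySem.Chars.join [] octet_bin
    vScan binary_netmask false true

-- ===== PORT B =====
-- the loop `for p in parts: num = int(p); range check; v = (v << 8) | num`, none = early `return False`
def vAccum : List (List Char) → Int → Option Int
  | [], v => some v
  | p :: rest, v =>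
    let num := (PySem.Int.ofChars? p).getD 0
    if ¬(0 ≤ num ∧ num ≤ 255) then none
    else vAccum rest (PySem.Int.bor (v <<< (8:Nat)) num)

def validate_ipv4_netmask_format_alt (netmask : String) : Bool :=
  let parts := PySem.Chars.splitOn netmask.toList ['.']
  if parts.length ≠ 4 then false
  else
    match vAccum parts 0 with
    | none => false
    | some v =>
      let c : Int := 4294967295 - v
      v != 0 && (PySem.Int.band c (c + 1) == 0)

-- ===== PRECONDITION & SPEC =====
-- Pre_ excludes 4-part inputs containing a non-integer octet: on those both Pythons raise
-- ValueError at that octet, except when an earlier octet is parseable but out of range, in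
-- which case both already returned False (so Pre_ is slightly narrower than the raising set).
def Pre_validate_ipv4_netmask_format (netmask : String) : Prop :=
  (PySem.Chars.splitOn netmask.toList ['.']).length = 4 →
    ∀ p ∈ PySem.Chars.splitOn netmask.toList ['.'], (PySem.Int.ofChars? p).isSome

instance (netmask : String) : Decidable (Pre_validate_ipv4_netmask_format netmask) := by
  unfold Pre_validate_ipv4_netmask_format; infer_instance

def pvWitness_validate_ipv4_netmask_format : String := "255.255.0.0"

def Spec_validate_ipv4_netmask_format (netmask : String) (out : Bool) : Prop :=
  out = validate_ipv4_netmask_format_alt netmask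
instance (netmask : String) (out : Bool) : Decidable (Spec_validate_ipv4_netmask_format netmask out) := by
  unfold Spec_validate_ipv4_netmask_format; infer_instance

-- ===== CLAIM (what is proved, stated in full; the proofs are below) =====
def Claim_equal_validate_ipv4_netmask_format : Prop := ∀ (netmask : String), Dom_validate_ipv4_netmask_format netmask → Pre_validate_ipv4_netmask_format netmask → Spec_validate_ipv4_netmask_format netmask (validate_ipv4_netmask_format netmask)

-- ===== LEMMAS AND PROOFS =====



def vAllNZ (x : List Char) : Bool := x.all (fun c => !(c == '0'))

def vB8 (n : Nat) : List Char := PySem.Chars.zfill (PySem.Int.toBinChars (n:Int)) 8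

theorem z_append (x y : List Char) :
    vScan (x ++ y) true false = (vScan x true false && vScan y true false) := by
  induction x with
  | nil => simp [vScan]
  | cons c r ih =>
    by_cases h : c == '1' <;> simp [vScan, h, ih]

theorem g_append (x y : List Char) :
    vScan (x ++ y) false false =
      (if vAllNZ x then vScan y false false else vScan x false false && vScan y true false) := by
  induction x with
  | nil => simp [vAllNZ]
  | cons c r ih =>
    by_cases h : c == '0'
    · simp [vScan, vAllNZ, h, z_append]
    · simp [vScan, vAllNZ, h, ih]

theorem top_cons (c : Char) (r : List Char) :
    vScan (c :: r) false true = (if c == '0' then false else vScan r false false) := by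
  by_cases h : c == '0' <;> simp [vScan, h]

theorem top_append (x y : List Char) (hx : x ≠ []) :
    vScan (x ++ y) false true =
      (if vAllNZ x then vScan y false false else vScan x false true && vScan y true false) := by
  cases x with
  | nil => exact absurd rfl hx
  | cons c r =>
    by_cases h : c == '0'
    · simp [top_cons, vAllNZ, h]
    · simp [top_cons, vAllNZ, h, g_append]

set_option maxRecDepth 10000 in
theorem oz : ∀ n, n < 256 → (vScan (vB8 n) true false = decide (n = 0)) := by decide
set_option maxRecDepth 10000 in
theorem oP : ∀ n, n < 256 → (vAllNZ (vB8 n) = decide (n = 255)) := by decide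
set_option maxRecDepth 10000 in
theorem og : ∀ n, n < 256 → (vScan (vB8 n) false false = decide (∃ m, m ≤ 8 ∧ n = 256 - 2^m)) := by decide
set_option maxRecDepth 10000 in
theorem otop : ∀ n, n < 256 → (vScan (vB8 n) false true = decide (∃ m, m ≤ 7 ∧ n = 256 - 2^m)) := by decide
set_option maxRecDepth 10000 in
theorem oNe : ∀ n, n < 256 → vB8 n ≠ [] := by decide


theorem or_shift (k : Nat) : ∀ m r : Nat, r < 2^k → (m <<< k) ||| r = m * 2^k + r := by
  induction k with
  | zero => intro m r h; interval_cases r; simp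
  | succ k ih =>
    intro m r h
    have h2 : r.div2 < 2^k := by
      have := Nat.bodd_add_div2 r
      have hp : 2^(k+1) = 2*2^k := by ring
      rcases r.bodd <;> simp_all <;> omega
    have hb : m <<< (k+1) = Nat.bit false (m <<< k) := by
      simp [Nat.bit_val, Nat.shiftLeft_succ, Nat.mul_comm]
    calc m <<< (k+1) ||| r = Nat.bit false (m <<< k) ||| Nat.bit r.bodd r.div2 := by
          rw [hb, Nat.bit_bodd_div2]
      _ = Nat.bit r.bodd ((m <<< k) ||| r.div2) := by rw [Nat.lor_bit]; simp
      _ = m * 2^(k+1) + r := by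
          rw [ih m r.div2 h2, Nat.bit_val]
          have hbd := Nat.bodd_add_div2 r
          have hp : m * 2^(k+1) = 2*(m * 2^k) := by ring
          omega

theorem land_succ_eq_zero_iff (c : Nat) : c &&& (c+1) = 0 ↔ ∃ m, c = 2^m - 1 := by
  induction c using Nat.binaryRec' with
  | zero => exact ⟨fun _ => ⟨0, rfl⟩, fun _ => rfl⟩
  | bit b q hq ih =>
    cases b with
    | false =>
      have hq0 : q ≠ 0 := fun h => by simpa using hq h
      have h1 : Nat.bit false q + 1 = Nat.bit true q := by simp [Nat.bit_val]
      rw [h1, Nat.land_bit]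
      simp only [Nat.and_self]
      constructor
      · intro h; exact absurd (Nat.bit_eq_zero_iff.mp h).1 hq0
      · rintro ⟨m, hm⟩
        exfalso
        rw [Nat.bit_val] at hm; simp only [Bool.toNat_false] at hm
        rcases m with _ | m
        · omega
        · have hp : (2:Nat)^(m+1) = 2*2^m := by ring
          have h2 : (1:Nat) ≤ 2^m := Nat.one_le_two_pow
          omega
    | true =>
      have h1 : Nat.bit true q + 1 = Nat.bit false (q+1) := by
        rw [Nat.bit_val, Nat.bit_val]; simp; omega
      rw [h1, Nat.land_bit]
      simp only [Bool.and_false]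
      rw [show Nat.bit false (q &&& (q+1)) = 0 ↔ q &&& (q+1) = 0 from by
        simp]
      rw [ih]
      constructor
      · rintro ⟨m, rfl⟩
        refine ⟨m+1, ?_⟩
        rw [Nat.bit_val]
        have hp : (2:Nat)^(m+1) = 2*2^m := by ring
        have h2 : (1:Nat) ≤ 2^m := Nat.one_le_two_pow
        simp; omega
      · rintro ⟨m, hm⟩
        rw [Nat.bit_val] at hm; simp only [Bool.toNat_true] at hm
        rcases m with _ | m
        · omega
        · refine ⟨m, ?_⟩
          have hp : (2:Nat)^(m+1) = 2*2^m := by ring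
          have h2 : (1:Nat) ≤ 2^m := Nat.one_le_two_pow
          omega
theorem pow_le_iff_le (a b : Nat) : 2^a ≤ 2^b ↔ a ≤ b := Nat.pow_le_pow_iff_right (by norm_num)

theorem arith_key (N : Nat) (hN : N < 4294967296) :
    (N ≠ 0 ∧ (4294967295 - N) &&& ((4294967295 - N) + 1) = 0) ↔ (∃ m, m ≤ 31 ∧ N = 4294967296 - 2^m) := by
  rw [land_succ_eq_zero_iff]
  constructor
  · rintro ⟨hne, m, hm⟩
    have h1 : (1:Nat) ≤ 2^m := Nat.one_le_two_pow
    have hle : 2^m ≤ 2^32 := by omega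
    rw [pow_le_iff_le] at hle
    have h31 : m ≤ 31 := by
      rcases Nat.lt_or_ge m 32 with h | h
      · omega
      · have : m = 32 := by omega
        subst this; norm_num at hm; omega
    refine ⟨m, h31, ?_⟩
    have : 2^m ≤ 2^31 := (pow_le_iff_le m 31).mpr h31
    omega
  · rintro ⟨m, hm, rfl⟩
    have h1 : (1:Nat) ≤ 2^m := Nat.one_le_two_pow
    have : 2^m ≤ 2^31 := (pow_le_iff_le m 31).mpr hm
    exact ⟨by omega, m, by omega⟩

theorem big (n0 n1 n2 n3 : Nat) (h0 : n0 < 256) (h1 : n1 < 256) (h2 : n2 < 256) (h3 : n3 < 256) :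
    vScan (vB8 n0 ++ (vB8 n1 ++ (vB8 n2 ++ vB8 n3))) false true =
      (decide (((n0*256+n1)*256+n2)*256+n3 ≠ 0) &&
       decide ((4294967295 - (((n0*256+n1)*256+n2)*256+n3)) &&&
               ((4294967295 - (((n0*256+n1)*256+n2)*256+n3)) + 1) = 0)) := by
  set N := ((n0*256+n1)*256+n2)*256+n3 with hNdef
  have hNlt : N < 4294967296 := by omega
  rw [top_append _ _ (oNe n0 h0)]
  simp only [g_append, z_append, oP n0 h0, oP n1 h1, oP n2 h2, otop n0 h0,
    og n1 h1, og n2 h2, og n3 h3, oz n1 h1, oz n2 h2, oz n3 h3]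
  by_cases e0 : n0 = 255
  · subst e0
    by_cases e1 : n1 = 255
    · subst e1
      by_cases e2 : n2 = 255
      · subst e2
        simp only [decide_true, if_true, ← Bool.decide_and, decide_eq_decide]
        rw [arith_key N hNlt]
        constructor
        · rintro ⟨m, hm, rfl⟩
          have ht : (1:Nat) ≤ 2^m := Nat.one_le_two_pow
          have : 2^m ≤ 2^8 := (pow_le_iff_le m 8).mpr hm
          exact ⟨m, by omega, by omega⟩
        · rintro ⟨m, hm, hN⟩
          have ht : (1:Nat) ≤ 2^m := Nat.one_le_two_pow
          have h8 : m ≤ 8 := by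
            by_contra hc
            have : 2^9 ≤ 2^m := (pow_le_iff_le 9 m).mpr (by omega)
            omega
          have : 2^m ≤ 2^8 := (pow_le_iff_le m 8).mpr h8
          exact ⟨m, h8, by omega⟩
      · simp only [decide_true, if_true, e2, decide_false, Bool.false_eq_true, if_false, ← Bool.decide_and, decide_eq_decide]
        rw [arith_key N hNlt]
        constructor
        · rintro ⟨⟨m, hm, hn2⟩, hz3⟩
          have ht : (1:Nat) ≤ 2^m := Nat.one_le_two_pow
          have hle : 2^m ≤ 2^8 := (pow_le_iff_le m 8).mpr hm
          refine ⟨m+8, by omega, ?_⟩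
          have hp : (2:Nat)^(m+8) = 2^m * 256 := by rw [pow_add]; norm_num
          omega
        · rintro ⟨m, hm, hN⟩
          have ht : (1:Nat) ≤ 2^m := Nat.one_le_two_pow
          have hm8 : 8 ≤ m := by
            by_contra hc
            have hle : 2^m ≤ 2^7 := (pow_le_iff_le m 7).mpr (by omega)
            have : n2 = 255 := by omega
            exact e2 this
          obtain ⟨k, rfl⟩ : ∃ k, m = k + 8 := ⟨m - 8, by omega⟩
          have hp : (2:Nat)^(k+8) = 2^k * 256 := by rw [pow_add]; norm_num
          have ht' : (1:Nat) ≤ 2^k := Nat.one_le_two_pow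
          have hk8 : k ≤ 8 := by
            by_contra hc
            have : 2^9 ≤ 2^k := (pow_le_iff_le 9 k).mpr (by omega)
            omega
          exact ⟨⟨k, hk8, by omega⟩, by omega⟩
    · simp only [decide_true, if_true, e1, decide_false, Bool.false_eq_true, if_false, ← Bool.decide_and,
        decide_eq_decide]
      rw [arith_key N hNlt]
      constructor
      · rintro ⟨⟨m, hm, hn1⟩, hz2, hz3⟩
        have ht : (1:Nat) ≤ 2^m := Nat.one_le_two_pow
        have hle : 2^m ≤ 2^8 := (pow_le_iff_le m 8).mpr hm
        refine ⟨m+16, by omega, ?_⟩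
        have hp : (2:Nat)^(m+16) = 2^m * 65536 := by rw [pow_add]; norm_num
        omega
      · rintro ⟨m, hm, hN⟩
        have ht : (1:Nat) ≤ 2^m := Nat.one_le_two_pow
        have hm16 : 16 ≤ m := by
          by_contra hc
          have hle : 2^m ≤ 2^15 := (pow_le_iff_le m 15).mpr (by omega)
          have : n1 = 255 := by omega
          exact e1 this
        obtain ⟨k, rfl⟩ : ∃ k, m = k + 16 := ⟨m - 16, by omega⟩
        have hp : (2:Nat)^(k+16) = 2^k * 65536 := by rw [pow_add]; norm_num
        have ht' : (1:Nat) ≤ 2^k := Nat.one_le_two_pow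
        have hk8 : k ≤ 8 := by
          by_contra hc
          have : 2^9 ≤ 2^k := (pow_le_iff_le 9 k).mpr (by omega)
          omega
        exact ⟨⟨k, hk8, by omega⟩, by omega, by omega⟩
  · simp only [e0, decide_false, Bool.false_eq_true, if_false, ← Bool.decide_and, decide_eq_decide]
    rw [arith_key N hNlt]
    constructor
    · rintro ⟨⟨m, hm, hn0⟩, hz1, hz2, hz3⟩
      have ht : (1:Nat) ≤ 2^m := Nat.one_le_two_pow
      have hle : 2^m ≤ 2^7 := (pow_le_iff_le m 7).mpr hm
      refine ⟨m+24, by omega, ?_⟩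
      have hp : (2:Nat)^(m+24) = 2^m * 16777216 := by rw [pow_add]; norm_num
      omega
    · rintro ⟨m, hm, hN⟩
      have ht : (1:Nat) ≤ 2^m := Nat.one_le_two_pow
      have hm24 : 24 ≤ m := by
        by_contra hc
        have hle : 2^m ≤ 2^23 := (pow_le_iff_le m 23).mpr (by omega)
        have : n0 = 255 := by omega
        exact e0 this
      obtain ⟨k, rfl⟩ : ∃ k, m = k + 24 := ⟨m - 24, by omega⟩
      have hp : (2:Nat)^(k+24) = 2^k * 16777216 := by rw [pow_add]; norm_num
      have ht' : (1:Nat) ≤ 2^k := Nat.one_le_two_pow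
      have hk7 : k ≤ 7 := by omega
      exact ⟨⟨k, hk7, by omega⟩, by omega, by omega, by omega⟩

theorem join4 (a b c d : List Char) :
    PySem.Chars.join [] [a, b, c, d] = a ++ (b ++ (c ++ d)) := by
  simp [PySem.Chars.join_cons_cons, PySem.Chars.join_singleton]

theorem bor_step (k : Nat) (num : Int) (hn0 : 0 ≤ num) (hn255 : num ≤ 255) :
    PySem.Int.bor ((k : Int) <<< (8:Nat)) num = ((k * 256 + num.toNat : Nat) : Int) := by
  obtain ⟨t, rfl⟩ := Int.eq_ofNat_of_zero_le hn0
  have ht' : (t : Int) ≤ 255 := hn255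
  have ht : t < 2^8 := by omega
  rw [show ((k : Int) <<< (8:Nat)) = ((k <<< 8 : Nat) : Int) from rfl, PySem.Int.bor_natCast,
      or_shift 8 k t ht]
  norm_num

theorem bside (N : Nat) (h : N < 4294967296) :
    (((N : Int) != 0) && (PySem.Int.band (4294967295 - (N:Int)) ((4294967295 - (N:Int)) + 1) == 0))
      = (decide (N ≠ 0) &&
         decide ((4294967295 - N) &&& ((4294967295 - N) + 1) = 0)) := by
  have hc : (4294967295 : Int) - (N:Int) = ((4294967295 - N : Nat) : Int) := by
    rw [Nat.cast_sub (by omega)]; norm_num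
  have hc1 : ((4294967295 - N : Nat) : Int) + 1 = ((4294967295 - N + 1 : Nat) : Int) := by
    push_cast; ring
  rw [hc, hc1, PySem.Int.band_natCast]
  rw [bne, beq_eq_decide, beq_eq_decide]
  simp

theorem main_eq (netmask : String) :
    validate_ipv4_netmask_format netmask = validate_ipv4_netmask_format_alt netmask := by
  unfold validate_ipv4_netmask_format validate_ipv4_netmask_format_alt
  generalize PySem.Chars.splitOn netmask.toList ['.'] = parts
  by_cases hlen : parts.length = 4
  case neg => simp [hlen]
  obtain ⟨p0, p1, p2, p3, rfl⟩ : ∃ a b c d, parts = [a, b, c, d] := by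
    rcases parts with _ | ⟨a, _ | ⟨b, _ | ⟨c, _ | ⟨d, _ | ⟨e, t⟩⟩⟩⟩⟩
    all_goals first
      | exact ⟨_, _, _, _, rfl⟩
      | (exfalso; simp at hlen)
  rw [if_neg (show ¬(([p0, p1, p2, p3] : List (List Char)).length ≠ 4) from by simp),
      if_neg (show ¬(([p0, p1, p2, p3] : List (List Char)).length ≠ 4) from by simp)]
  by_cases r0 : 0 ≤ (PySem.Int.ofChars? p0).getD 0 ∧ (PySem.Int.ofChars? p0).getD 0 ≤ 255
  case neg => simp [vOctetsOk, vAccum, r0]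
  by_cases r1 : 0 ≤ (PySem.Int.ofChars? p1).getD 0 ∧ (PySem.Int.ofChars? p1).getD 0 ≤ 255
  case neg => simp [vOctetsOk, vAccum, r0, r1]
  by_cases r2 : 0 ≤ (PySem.Int.ofChars? p2).getD 0 ∧ (PySem.Int.ofChars? p2).getD 0 ≤ 255
  case neg => simp [vOctetsOk, vAccum, r0, r1, r2]
  by_cases r3 : 0 ≤ (PySem.Int.ofChars? p3).getD 0 ∧ (PySem.Int.ofChars? p3).getD 0 ≤ 255
  case neg => simp [vOctetsOk, vAccum, r0, r1, r2, r3]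
  obtain ⟨t0, ht0⟩ := Int.eq_ofNat_of_zero_le r0.1
  obtain ⟨t1, ht1⟩ := Int.eq_ofNat_of_zero_le r1.1
  obtain ⟨t2, ht2⟩ := Int.eq_ofNat_of_zero_le r2.1
  obtain ⟨t3, ht3⟩ := Int.eq_ofNat_of_zero_le r3.1
  rw [ht0] at r0; rw [ht1] at r1; rw [ht2] at r2; rw [ht3] at r3
  have b0 : t0 < 256 := by have := r0.2; omega
  have b1 : t1 < 256 := by have := r1.2; omega
  have b2 : t2 < 256 := by have := r2.2; omega
  have b3 : t3 < 256 := by have := r3.2; omega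
  have hok : vOctetsOk [p0, p1, p2, p3] = true := by
    simp only [vOctetsOk, ht0, ht1, ht2, ht3]
    rw [if_neg (not_not_intro r0), if_neg (not_not_intro r1),
        if_neg (not_not_intro r2), if_neg (not_not_intro r3)]
  have hacc : vAccum [p0, p1, p2, p3] 0 =
      some ((((t0 * 256 + t1) * 256 + t2) * 256 + t3 : Nat) : Int) := by
    simp only [vAccum, ht0, ht1, ht2, ht3]
    rw [if_neg (not_not_intro r0), if_neg (not_not_intro r1),
        if_neg (not_not_intro r2), if_neg (not_not_intro r3)]
    rw [show (0:Int) = ((0:Nat) : Int) from rfl]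
    rw [bor_step 0 _ (by omega) (by omega)]
    rw [bor_step _ _ (by omega) (by omega)]
    rw [bor_step _ _ (by omega) (by omega)]
    rw [bor_step _ _ (by omega) (by omega)]
    norm_num
  rw [hok, hacc]
  simp only [Bool.not_true, Bool.false_eq_true, if_false, List.map_cons, List.map_nil]
  rw [ht0, ht1, ht2, ht3]
  rw [show PySem.Chars.zfill (PySem.Int.toBinChars ((t0 : Nat) : Int)) 8 = vB8 t0 from rfl,
      show PySem.Chars.zfill (PySem.Int.toBinChars ((t1 : Nat) : Int)) 8 = vB8 t1 from rfl,
      show PySem.Chars.zfill (PySem.Int.toBinChars ((t2 : Nat) : Int)) 8 = vB8 t2 from rfl,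
      show PySem.Chars.zfill (PySem.Int.toBinChars ((t3 : Nat) : Int)) 8 = vB8 t3 from rfl]
  rw [join4, big _ _ _ _ b0 b1 b2 b3]
  rw [bside _ (by omega)]

-- ===== VERDICT (by name: the statement is the Claim_ definition above) =====
theorem validate_ipv4_netmask_format_spec : Claim_equal_validate_ipv4_netmask_format := by
  intro netmask _ _
  unfold Spec_validate_ipv4_netmask_format
  exact main_eq netmask
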